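-- pv_equiv track=rewrite | github.com/nia11j/Jugendwettbewerb-Informatik-2022-R3A2 | schwerster_container.py | such_den_schwersten
-- ===== SOURCE A (Python) =====
-- def such_den_schwersten(paarliste):
--     klein_container = set()
--     gross_container = set()
--     for paar in paarliste:
--         if paar[1] in gross_container:
--             gross_container.remove(paar[1])
--         klein_container.add(paar[1])
--         if paar[0] in klein_container:
--             continue
--         gross_container.add(paar[0])
--     if len(gross_container) == 1:
--         return list(gross_container)[0]
--     else:
--         return -1
-- ===== SOURCE B (Python) =====
-- def such_den_schwersten(paarliste):
--     winners = {paar[0] for paar in paarliste}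
--     losers = {paar[1] for paar in paarliste}
--     cand = winners - losers
--     return cand.pop() if len(cand) == 1 else -1
-- ===== Notes on version B (the rewrite author's own statement) =====
-- stated objective: simpler
-- what changed: Replaces A's order-dependent single pass that maintains gross_container with conditional remove/continue by two set comprehensions and one set difference (winners - losers).
import Mathlib
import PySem

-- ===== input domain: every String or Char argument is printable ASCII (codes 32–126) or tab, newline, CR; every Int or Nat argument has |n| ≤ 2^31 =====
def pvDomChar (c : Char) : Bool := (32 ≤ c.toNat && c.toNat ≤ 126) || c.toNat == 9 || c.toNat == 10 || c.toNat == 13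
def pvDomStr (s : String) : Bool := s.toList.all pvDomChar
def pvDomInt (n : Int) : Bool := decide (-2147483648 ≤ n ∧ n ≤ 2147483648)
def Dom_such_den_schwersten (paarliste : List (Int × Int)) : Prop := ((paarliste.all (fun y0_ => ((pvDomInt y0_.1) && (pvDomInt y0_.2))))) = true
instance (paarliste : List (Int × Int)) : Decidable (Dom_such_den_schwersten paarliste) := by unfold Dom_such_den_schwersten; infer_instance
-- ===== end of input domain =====

-- B replaces A's order-dependent single pass (conditional remove/continue on gross_container)
-- by winners/losers set comprehensions and one set difference; objective: simpler.


-- ===== PORT A =====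
-- one loop body step: remove paar.2 from gross if present, add paar.2 to klein,
-- then add paar.1 to gross unless paar.1 is in klein ('continue')
def pvStepA (st : PySem.Set Int × PySem.Set Int) (paar : Int × Int) :
    PySem.Set Int × PySem.Set Int :=
  let gross := if PySem.Set.contains st.2 paar.2 then PySem.Set.discard st.2 paar.2 else st.2
  let klein := PySem.Set.add st.1 paar.2
  if PySem.Set.contains klein paar.1 then (klein, gross)
  else (klein, PySem.Set.add gross paar.1)

def such_den_schwersten (paarliste : List (Int × Int)) : Int :=
  let st := paarliste.foldl pvStepA (PySem.Set.empty, PySem.Set.empty)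
  if PySem.Set.len st.2 = 1 then st.2.headI else -1
  -- list(gross)[0] on a one-element set is its unique element: headI

-- ===== PORT B =====
def such_den_schwersten_alt (paarliste : List (Int × Int)) : Int :=
  let winners := PySem.Set.ofList (paarliste.map (fun paar => paar.1))
  let losers := PySem.Set.ofList (paarliste.map (fun paar => paar.2))
  let cand := PySem.Set.diff winners losers
  if PySem.Set.len cand = 1 then cand.headI else -1
  -- cand.pop() on a one-element set is its unique element: headI

-- ===== PRECONDITION & SPEC =====
def Spec_such_den_schwersten (paarliste : List (Int × Int)) (out : Int) : Prop := out = such_den_schwersten_alt paarliste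
instance (paarliste : List (Int × Int)) (out : Int) : Decidable (Spec_such_den_schwersten paarliste out) := by unfold Spec_such_den_schwersten; infer_instance

-- ===== CLAIM (what is proved, stated in full; the proofs are below) =====
def Claim_equal_such_den_schwersten : Prop := ∀ (paarliste : List (Int × Int)), Dom_such_den_schwersten paarliste → Spec_such_den_schwersten paarliste (such_den_schwersten paarliste)

-- ===== LEMMAS AND PROOFS =====


-- propositional cores of the two induction-step cases (kept abstract so no search tactic is needed)
theorem pvL1 (G K E1 E2 F S KP EP : Prop) (hc : KP ∨ EP)
    (b1 : E1 → (K ↔ KP)) (b2 : E1 → (E2 ↔ EP)) :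
    ((G ∧ ¬E2) ∧ ¬S ∨ ¬(K ∨ E2) ∧ F ∧ ¬S) ↔
    (G ∧ ¬(E2 ∨ S) ∨ ¬K ∧ (E1 ∨ F) ∧ ¬(E2 ∨ S)) := by
  constructor
  · rintro (⟨⟨hG, hne2⟩, hns⟩ | ⟨hnke2, hF, hns⟩)
    · exact Or.inl ⟨hG, fun h => h.elim hne2 hns⟩
    · exact Or.inr ⟨fun hK => hnke2 (Or.inl hK), Or.inr hF,
        fun h => h.elim (fun e => hnke2 (Or.inr e)) hns⟩
  · rintro (⟨hG, hns⟩ | ⟨hnK, hEF, hns⟩)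
    · exact Or.inl ⟨⟨hG, fun e => hns (Or.inl e)⟩, fun hs => hns (Or.inr hs)⟩
    · rcases hEF with hE1 | hF
      · rcases hc with hKP | hEP
        · exact absurd ((b1 hE1).2 hKP) hnK
        · exact absurd (Or.inl ((b2 hE1).2 hEP)) hns
      · exact Or.inr ⟨fun h => h.elim hnK (fun e => hns (Or.inl e)), hF,
          fun hs => hns (Or.inr hs)⟩

theorem pvL2 (G K E1 E2 F S KP EP : Prop) (hnkp : ¬KP) (hnep : ¬EP)
    (b1 : E1 → (K ↔ KP)) (b2 : E1 → (E2 ↔ EP)) :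
    ((G ∧ ¬E2 ∨ E1) ∧ ¬S ∨ ¬(K ∨ E2) ∧ F ∧ ¬S) ↔
    (G ∧ ¬(E2 ∨ S) ∨ ¬K ∧ (E1 ∨ F) ∧ ¬(E2 ∨ S)) := by
  constructor
  · rintro (⟨hG2 | hE1, hns⟩ | ⟨hnke2, hF, hns⟩)
    · exact Or.inl ⟨hG2.1, fun h => h.elim hG2.2 hns⟩
    · exact Or.inr ⟨fun hK => hnkp ((b1 hE1).1 hK), Or.inl hE1,
        fun h => h.elim (fun e => hnep ((b2 hE1).1 e)) hns⟩
    · exact Or.inr ⟨fun hK => hnke2 (Or.inl hK), Or.inr hF,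
        fun h => h.elim (fun e => hnke2 (Or.inr e)) hns⟩
  · rintro (⟨hG, hns⟩ | ⟨hnK, hEF, hns⟩)
    · exact Or.inl ⟨Or.inl ⟨hG, fun e => hns (Or.inl e)⟩, fun hs => hns (Or.inr hs)⟩
    · rcases hEF with hE1 | hF
      · exact Or.inl ⟨Or.inr hE1, fun hs => hns (Or.inr hs)⟩
      · exact Or.inr ⟨fun h => h.elim hnK (fun e => hns (Or.inl e)), hF,
          fun hs => hns (Or.inr hs)⟩

-- loop invariant: after folding pvStepA over l from state (klein, gross) (both Nodup),
-- the final klein holds klein ∪ losers(l) and the final gross holds exactly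
-- (gross \ losers(l)) ∪ (winners(l) \ (klein ∪ losers(l)))
theorem pvFoldA_inv (l : List (Int × Int)) (klein gross : PySem.Set Int)
    (hk : klein.Nodup) (hg : gross.Nodup) :
    (l.foldl pvStepA (klein, gross)).1.Nodup ∧
    (l.foldl pvStepA (klein, gross)).2.Nodup ∧
    (∀ x : Int, x ∈ (l.foldl pvStepA (klein, gross)).2 ↔
      ((x ∈ gross ∧ x ∉ l.map (fun p => p.2)) ∨
       (x ∉ klein ∧ x ∈ l.map (fun p => p.1) ∧ x ∉ l.map (fun p => p.2)))) := by
  induction l generalizing klein gross with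
  | nil => simpa using ⟨hk, hg⟩
  | cons p rest ih =>
    have hg0 : (if PySem.Set.contains gross p.2 then PySem.Set.discard gross p.2 else gross).Nodup := by
      split
      · exact PySem.Set.nodup_discard _ _ hg
      · exact hg
    have hmem0 : ∀ x : Int,
        x ∈ (if PySem.Set.contains gross p.2 then PySem.Set.discard gross p.2 else gross) ↔
        (x ∈ gross ∧ x ≠ p.2) := by
      intro x
      split
      · exact PySem.Set.mem_discard _ _ _
      · rename_i h
        rw [Bool.not_eq_true, ← Bool.not_eq_true, PySem.Set.contains_iff] at h
        constructor
        · intro hx; exact ⟨hx, fun e => h (e ▸ hx)⟩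
        · exact And.left
    -- unfold one step
    simp only [List.foldl_cons, pvStepA]
    by_cases hc : PySem.Set.contains (PySem.Set.add klein p.2) p.1 = true
    · simp only [hc, if_pos]
      have hk1 : (PySem.Set.add klein p.2).Nodup := PySem.Set.nodup_add _ _ hk
      obtain ⟨h1, h2, h3⟩ := ih (PySem.Set.add klein p.2) _ hk1 hg0
      refine ⟨h1, h2, ?_⟩
      intro x
      rw [h3 x]
      rw [PySem.Set.contains_iff, PySem.Set.mem_add] at hc
      simp only [hmem0, PySem.Set.mem_add, List.map_cons, List.mem_cons]
      exact pvL1 _ _ _ _ _ _ _ _ hc (fun e => by rw [e]) (fun e => by rw [e])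
    · simp only [hc, if_neg, Bool.not_eq_true]
      rw [Bool.not_eq_true, ← Bool.not_eq_true, PySem.Set.contains_iff, PySem.Set.mem_add] at hc
      push Not at hc
      have hk1 : (PySem.Set.add klein p.2).Nodup := PySem.Set.nodup_add _ _ hk
      have hg1 : (PySem.Set.add (if PySem.Set.contains gross p.2 then PySem.Set.discard gross p.2 else gross) p.1).Nodup :=
        PySem.Set.nodup_add _ _ hg0
      obtain ⟨h1, h2, h3⟩ := ih (PySem.Set.add klein p.2) _ hk1 hg1
      refine ⟨h1, h2, ?_⟩
      intro x
      rw [h3 x]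
      simp only [PySem.Set.mem_add, hmem0, List.map_cons, List.mem_cons]
      exact pvL2 _ _ _ _ _ _ _ _ hc.1 hc.2 (fun e => by rw [e]) (fun e => by rw [e])

-- two Nodup lists with the same members give the same "singleton head else -1" answer
theorem pvSingleton_eq (s t : List Int) (hs : s.Nodup) (ht : t.Nodup)
    (h : ∀ x, x ∈ s ↔ x ∈ t) :
    (if PySem.Set.len s = 1 then s.headI else -1) =
    (if PySem.Set.len t = 1 then t.headI else -1) := by
  have hperm : s.Perm t := (List.perm_ext_iff_of_nodup hs ht).2 h
  have hlen : s.length = t.length := hperm.length_eq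
  simp only [PySem.Set.len, hlen]
  split
  · rename_i h1
    have ht1 : t.length = 1 := by omega
    have hs1 : s.length = 1 := by omega
    obtain ⟨b, rfl⟩ : ∃ b, t = [b] := by
      cases t with
      | nil => simp at ht1
      | cons b t' =>
        cases t' with
        | nil => exact ⟨b, rfl⟩
        | cons c t'' => simp at ht1
    obtain ⟨a, rfl⟩ : ∃ a, s = [a] := by
      cases s with
      | nil => simp at hs1
      | cons a s' =>
        cases s' with
        | nil => exact ⟨a, rfl⟩
        | cons c s'' => simp at hs1
    have hab : a = b := by simpa using (h a).1 (List.mem_singleton_self a)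
    simp [hab]
  · rfl

-- ===== VERDICT (by name: the statement is the Claim_ definition above) =====
theorem such_den_schwersten_spec : Claim_equal_such_den_schwersten := by
  intro l _
  unfold Spec_such_den_schwersten such_den_schwersten such_den_schwersten_alt
  obtain ⟨-, hnd, hmem⟩ := pvFoldA_inv l PySem.Set.empty PySem.Set.empty List.nodup_nil List.nodup_nil
  refine pvSingleton_eq _ _ hnd ?_ ?_
  · exact PySem.Set.nodup_diff _ _ (PySem.Set.nodup_ofList _)
  · intro x
    rw [hmem x]
    simp [PySem.Set.mem_diff, PySem.Set.mem_ofList, PySem.Set.empty]
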